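-- pv_equiv track=rewrite | github.com/timakin/n_repo | contribution_weight.py | order_pattern
-- ===== SOURCE A (Python) =====
-- def order_pattern(authorlist):
-- 	if sorted(authorlist) == authorlist:
-- 		#print 'CASE0'
-- 		return 1
-- 	elif sorted(authorlist) != authorlist:
-- 		fst = []
-- 		fst.append(authorlist[0])
-- 		del authorlist[0]
-- 		div = []
-- 		div_ovr = 0
-- 		while len(fst) >= 1:
-- 			fst.append(authorlist[0])
-- 			if sorted(fst) == fst:
-- 				del authorlist[0]
-- 				if len(authorlist) == 0:
-- 					div.append(len(fst))
-- 					if len(fst) >= 3: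
-- 						div_ovr += 1
-- 						if div_ovr >= 2:
-- 							#print 'CASE1; div_ovr'+str(div_ovr)
-- 							#print div
-- 							return 1
-- 						elif div_ovr == 1:
-- 							#print 'CASE2; div_ovr'+str(div_ovr)
-- 							#print div
-- 							return 2
-- 					elif len(fst) == 2 and div_ovr == 1:
-- 						#print 'CASE3; div_ovr'+str(div_ovr)
-- 						#print div
-- 						return 2
-- 					elif len(fst) == 2 and div_ovr >= 2:
-- 						#print 'CASE4; div_ovr'+str(div_ovr)
-- 						#print div
-- 						return 1
-- 					else:
-- 						#print 'CASE5; div_ovr'+str(div_ovr)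
-- 						#print div
-- 						return 0
-- 					break
-- 			elif sorted(fst) != fst:
-- 				div.append(len(fst)-1)
-- 				if len(fst)-1 >= 3:
-- 					div_ovr += 1
-- 				fst = []
-- 				fst.append(authorlist[0])
-- 				del authorlist[0]
-- 				if len(authorlist) == 0:
-- 					div.append(1)
-- 					if div_ovr == 1:
-- 						#print 'CASE6; div_ovr'+str(div_ovr)
-- 						#print div
-- 						return 2
-- 					elif div_ovr >= 2:
-- 						#print 'CASE7; div_ovr'+str(div_ovr)
-- 						#print div
-- 						return 1
-- 					else:
-- 						#print 'CASE8; div_ovr'+str(div_ovr)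
-- 						#print div
-- 						return 0
-- 					break
-- ===== SOURCE B (Python) =====
-- def order_pattern(authorlist):
--     if not authorlist:
--         return 1
--     runs = []
--     cur = 1
--     for prev, x in zip(authorlist, authorlist[1:]):
--         if x >= prev:
--             cur += 1
--         else:
--             runs.append(cur)
--             cur = 1
--     runs.append(cur)
--     if len(runs) == 1:
--         return 1
--     big = sum(1 for r in runs if r >= 3)
--     return 1 if big >= 2 else 2 if big == 1 else 0
-- ===== Notes on version B (the rewrite author's own statement) =====
-- stated objective: faster
-- what changed: A re-sorts the growing run prefix on every element (and sorts the whole list up front); B makes one linear pass over adjacent pairs collecting run lengths and classifies by the number of runs of length >= 3.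
import Mathlib
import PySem

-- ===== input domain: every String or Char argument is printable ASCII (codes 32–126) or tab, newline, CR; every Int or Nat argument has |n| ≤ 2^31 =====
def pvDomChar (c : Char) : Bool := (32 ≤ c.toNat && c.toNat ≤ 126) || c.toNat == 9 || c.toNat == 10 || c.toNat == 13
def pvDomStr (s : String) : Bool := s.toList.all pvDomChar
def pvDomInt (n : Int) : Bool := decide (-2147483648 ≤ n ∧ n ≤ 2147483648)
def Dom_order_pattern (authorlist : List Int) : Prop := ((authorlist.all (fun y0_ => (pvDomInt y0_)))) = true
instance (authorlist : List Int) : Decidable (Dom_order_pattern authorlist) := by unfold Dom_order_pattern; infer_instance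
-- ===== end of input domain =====

-- B replaces A's repeated re-sorting of the growing run prefix by one linear pass over
-- adjacent pairs collecting run lengths (objective: faster, asymptotic). Equivalence is about
-- the RETURN value only: Python A empties its argument list in place on unsorted input, B does not mutate it.

-- ===== PORT A =====
-- A's while-loop: each iteration consumes one element of authorlist (`rest` here); `fst` is the
-- growing current run, `div_ovr` the count of finished runs of length ≥ 3.
def opLoop (fst : List Int) (div_ovr : Int) (rest : List Int) : Int :=
  match rest with
  | [] => 0  -- unreachable: Python's loop head always sees a nonempty authorlist here
  | a :: rest' =>
    let fst' := fst ++ [a]                                   -- fst.append(authorlist[0])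
    if (PySem.List.sorted fst' (fun x => x) == fst') then    -- sorted(fst) == fst
      if rest' = [] then                                     -- del authorlist[0]; len == 0
        if (fst'.length : Int) ≥ 3 then
          (if div_ovr + 1 ≥ 2 then 1
           else if div_ovr + 1 = 1 then 2
           else 0)                                           -- unreachable fall-through (div_ovr ≥ 0 always)
        else if (fst'.length : Int) = 2 ∧ div_ovr = 1 then 2
        else if (fst'.length : Int) = 2 ∧ div_ovr ≥ 2 then 1
        else 0
      else opLoop fst' div_ovr rest'
    else
      let div_ovr' := if (fst'.length : Int) - 1 ≥ 3 then div_ovr + 1 else div_ovr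
      if rest' = [] then                                     -- fst = [authorlist[0]]; del; len == 0
        if div_ovr' = 1 then 2
        else if div_ovr' ≥ 2 then 1
        else 0
      else opLoop [a] div_ovr' rest'

def order_pattern (authorlist : List Int) : Int :=
  if (PySem.List.sorted authorlist (fun x => x) == authorlist) then 1
  else
    match authorlist with
    | [] => 0          -- unreachable: the empty list is sorted
    | a0 :: rest => opLoop [a0] 0 rest   -- fst = [authorlist[0]]; del authorlist[0]

-- ===== PORT B =====
-- loop over zip(authorlist, authorlist[1:]) with state (runs, cur)
def bLoop (runs : List Int) (cur : Int) (pairs : List (Int × Int)) : List Int × Int :=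
  match pairs with
  | [] => (runs, cur)
  | (prev, x) :: ps =>
    if x ≥ prev then bLoop runs (cur + 1) ps
    else bLoop (runs ++ [cur]) 1 ps

-- the code after B's loop: runs.append(cur); the len==1 check; big = sum(1 for r in runs if r >= 3)
def bFinish (runs : List Int) (cur : Int) : Int :=
  let runs' := runs ++ [cur]
  if runs'.length = 1 then 1
  else
    let big := runs'.foldl (fun acc r => if r ≥ 3 then acc + 1 else acc) (0 : Int)
    if big ≥ 2 then 1 else if big = 1 then 2 else 0

def order_pattern_alt (authorlist : List Int) : Int :=
  match authorlist with
  | [] => 1                                            -- if not authorlist: return 1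
  | _ :: tl =>
    let s := bLoop [] 1 (List.zip authorlist tl)       -- zip(authorlist, authorlist[1:])
    bFinish s.1 s.2

-- ===== PRECONDITION & SPEC =====
def Spec_order_pattern (authorlist : List Int) (out : Int) : Prop := out = order_pattern_alt authorlist
instance (authorlist : List Int) (out : Int) : Decidable (Spec_order_pattern authorlist out) := by unfold Spec_order_pattern; infer_instance

-- ===== CLAIM (what is proved, stated in full; the proofs are below) =====
def Claim_equal_order_pattern : Prop := ∀ (authorlist : List Int), Dom_order_pattern authorlist → Spec_order_pattern authorlist (order_pattern authorlist)

-- ===== LEMMAS AND PROOFS =====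

def countBig (runs : List Int) : Int :=
  runs.foldl (fun acc r => if r ≥ 3 then acc + 1 else acc) (0 : Int)

theorem countBig_append (runs : List Int) (x : Int) :
    countBig (runs ++ [x]) = countBig runs + (if x ≥ 3 then 1 else 0) := by
  simp only [countBig, List.foldl_append, List.foldl_cons, List.foldl_nil]
  split_ifs <;> simp

theorem countBig_nonneg (runs : List Int) : 0 ≤ countBig runs := by
  induction runs using List.reverseRecOn with
  | nil => simp [countBig]
  | append_singleton t x ih => rw [countBig_append]; split_ifs <;> omega

theorem sorted_beq_iff (l : List Int) :
    ((PySem.List.sorted l (fun x => x) == l) = true) ↔ l.Pairwise (· ≤ ·) := by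
  constructor
  · intro h
    have h' : PySem.List.sorted l (fun x => x) = l := by simpa using h
    have := PySem.List.sorted_pairwise (xs := l) (key := fun x => x)
    rw [h'] at this
    simpa using this
  · intro h
    have := PySem.List.sorted_eq_self_of_pairwise (xs := l) (key := fun x => x) (by simpa using h)
    simp [this]

theorem sorted_check (fst : List Int) (a p : Int)
    (hch : fst.Pairwise (· ≤ ·)) (hp : ∀ x ∈ fst, x ≤ p) (hmem : p ∈ fst) :
    (PySem.List.sorted (fst ++ [a]) (fun x => x) == (fst ++ [a])) = decide (p ≤ a) := by
  by_cases hpa : p ≤ a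
  · have hpw : (fst ++ [a]).Pairwise (· ≤ ·) := by
      rw [List.pairwise_append]
      exact ⟨hch, List.pairwise_singleton _ _, by
        intro x hx y hy; simp at hy; subst hy; exact le_trans (hp x hx) hpa⟩
    rw [(sorted_beq_iff _).mpr hpw]
    simp [hpa]
  · simp only [hpa, decide_false]
    by_contra h
    have hb : (PySem.List.sorted (fst ++ [a]) (fun x => x) == (fst ++ [a])) = true := by
      revert h; cases (PySem.List.sorted (fst ++ [a]) (fun x => x) == (fst ++ [a])) <;> simp
    have hpw := (sorted_beq_iff _).mp hb
    rw [List.pairwise_append] at hpw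
    exact hpa (hpw.2.2 p hmem a (by simp))

theorem chain_bLoop (rest : List Int) (p cur : Int) (runs : List Int)
    (h : List.IsChain (· ≤ ·) (p :: rest)) :
    bLoop runs cur (List.zip (p :: rest) rest) = (runs, cur + rest.length) := by
  induction rest generalizing p cur with
  | nil => simp [bLoop]
  | cons a t ih =>
    rw [List.isChain_cons_cons] at h
    simp only [List.zip_cons_cons, bLoop, ge_iff_le, h.1, if_true]
    rw [ih a (cur + 1) h.2]
    simp; omega

theorem main_loop (rest : List Int) (fst : List Int) (p cur c : Int) (runs : List Int)
    (hre : rest ≠ [])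
    (hch : fst.Pairwise (· ≤ ·)) (hp : ∀ x ∈ fst, x ≤ p) (hmem : p ∈ fst)
    (hcur : cur = (fst.length : Int))
    (hc : c = countBig runs)
    (H : runs ≠ [] ∨ ¬ List.IsChain (· ≤ ·) (p :: rest)) :
    opLoop fst c rest = bFinish (bLoop runs cur (List.zip (p :: rest) rest)).1
                                (bLoop runs cur (List.zip (p :: rest) rest)).2 := by
  induction rest generalizing fst p cur c runs with
  | nil => exact absurd rfl hre
  | cons a rest' ih =>
    have hc0 : 0 ≤ c := hc ▸ countBig_nonneg runs
    have hfne : fst ≠ [] := by intro h; rw [h] at hmem; simp at hmem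
    have hlen1 : 1 ≤ fst.length := by have := List.length_pos_iff.mpr hfne; omega
    rw [List.zip_cons_cons]
    simp only [opLoop, bLoop, sorted_check fst a p hch hp hmem, ge_iff_le]
    by_cases hpa : p ≤ a
    · simp only [hpa, decide_true, if_true]
      cases rest' with
      | nil =>
        -- last element, ascending step
        have hruns : runs ≠ [] := by
          rcases H with h | h
          · exact h
          · exact absurd (by simp [List.isChain_cons_cons, hpa]) h
        simp only [List.zip_nil_right, bLoop, bFinish]
        have hlen2 : (runs ++ [cur + 1]).length ≠ 1 := by
          simpa using hruns
        rw [if_neg hlen2]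
        have hbig : (runs ++ [cur + 1]).foldl (fun acc r => if r ≥ 3 then acc + 1 else acc) (0 : Int)
            = countBig runs + (if cur + 1 ≥ 3 then 1 else 0) := countBig_append runs (cur + 1)
        rw [hbig, ← hc]
        simp only [List.length_append, List.length_cons, List.length_nil]
        have hcast : ((fst.length + 1 : Nat) : Int) = cur + 1 := by rw [hcur]; push_cast; ring
        rw [hcast]
        split_ifs <;> omega
      | cons b rest'' =>
        have hch' : (fst ++ [a]).Pairwise (· ≤ ·) := by
          rw [List.pairwise_append]
          exact ⟨hch, List.pairwise_singleton _ _, by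
            intro x hx y hy; simp at hy; subst hy; exact le_trans (hp x hx) hpa⟩
        have H' : runs ≠ [] ∨ ¬ List.IsChain (· ≤ ·) (a :: b :: rest'') := by
          rcases H with h | h
          · exact Or.inl h
          · right; intro hcc; exact h (List.isChain_cons_cons.mpr ⟨hpa, hcc⟩)
        have := ih (fst ++ [a]) a (cur + 1) c runs (by simp) hch'
          (by intro x hx; simp at hx
              rcases hx with hx | hx
              · exact le_trans (hp x hx) hpa
              · simp [hx])
          (by simp) (by simp [hcur]) hc H'
        exact this
    · simp only [hpa, decide_false, if_false, Bool.false_eq_true]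
      have hlenm1 : ((fst ++ [a]).length : Int) - 1 = cur := by
        simp [List.length_append, hcur]
      rw [hlenm1]
      cases rest' with
      | nil =>
        simp only [List.zip_nil_right, bLoop, bFinish]
        have hlen2 : ((runs ++ [cur]) ++ [(1 : Int)]).length ≠ 1 := by
          simp [List.length_append]
        rw [if_neg hlen2]
        have hbig : ((runs ++ [cur]) ++ [(1 : Int)]).foldl (fun acc r => if r ≥ 3 then acc + 1 else acc) (0 : Int)
            = (countBig runs + (if cur ≥ 3 then 1 else 0)) + (if (1:Int) ≥ 3 then 1 else 0) := by
          show countBig ((runs ++ [cur]) ++ [(1:Int)]) = _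
          rw [countBig_append, countBig_append]
        rw [hbig, ← hc]
        split_ifs <;> omega
      | cons b rest'' =>
        have hc' : (if cur ≥ 3 then c + 1 else c) = countBig (runs ++ [cur]) := by
          rw [countBig_append, ← hc]; split_ifs <;> ring
        exact ih [a] a 1 (if cur ≥ 3 then c + 1 else c) (runs ++ [cur]) (by simp) (List.pairwise_singleton _ _)
          (by simp) (by simp) (by simp) hc' (Or.inl (by simp))

-- ===== VERDICT (by name: the statement is the Claim_ definition above) =====
theorem order_pattern_spec : Claim_equal_order_pattern := by
  intro l _
  unfold Spec_order_pattern order_pattern order_pattern_alt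
  by_cases hs : (PySem.List.sorted l (fun x => x) == l) = true
  · rw [if_pos hs]
    have hpw := (sorted_beq_iff l).mp hs
    cases l with
    | nil => rfl
    | cons a0 tl =>
      have hch : List.IsChain (· ≤ ·) (a0 :: tl) := (List.isChain_iff_pairwise).mpr hpw
      simp only
      rw [chain_bLoop tl a0 1 [] hch]
      simp [bFinish]
  · rw [if_neg hs]
    have hnpw : ¬ l.Pairwise (· ≤ ·) := fun h => hs ((sorted_beq_iff l).mpr h)
    cases l with
    | nil => exact absurd (List.Pairwise.nil) hnpw
    | cons a0 tl =>
      have hre : tl ≠ [] := by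
        intro h; subst h; exact hnpw (List.pairwise_singleton _ _)
      simp only
      exact main_loop tl [a0] a0 1 0 [] hre (List.pairwise_singleton _ _)
        (by simp) (by simp) (by simp) (by simp [countBig])
        (Or.inr (fun h => hnpw ((List.isChain_iff_pairwise).mp h)))
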